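-- pv_equiv track=rewrite | github.com/zincdigitalofmiami/CBI-V14 | ingestion/bulk_csv_loader.py | detect_symbol_type
-- ===== SOURCE A (Python) =====
-- def detect_symbol_type(filename: str) -> tuple:
--     """Detect symbol and target table from filename with enhanced categorization"""
--     filename = filename.lower()
--
--     # FOREX PAIRS (Research-weighted)
--     if any(x in filename for x in ['usdmyr', 'myr', 'ringgit']):
--         return 'USDMYR', 'currency_data'
--     elif any(x in filename for x in ['usdcny', 'cny', 'yuan']):
--         return 'USDCNY', 'currency_data'
--     elif any(x in filename for x in ['usdars', 'ars', 'peso']):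
--         return 'USDARS', 'currency_data'
--     elif any(x in filename for x in ['usdbrl', 'brl', 'real']):
--         return 'USDBRL', 'currency_data'
--     elif any(x in filename for x in ['eurusd', 'eur']):
--         return 'EURUSD', 'currency_data'
--     elif any(x in filename for x in ['usdjpy', 'jpy', 'yen']):
--         return 'USDJPY', 'currency_data'
--
--     # COMMODITY FUTURES (Deduplication critical)
--     elif any(x in filename for x in ['zl25', 'zl_', 'zl', 'soybean_oil', 'soyoil']):
--         return 'ZL', 'soybean_oil_prices'
--     elif any(x in filename for x in ['zs25', 'zs_', 'zs', 'soybean']):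
--         return 'ZS', 'soybean_prices'
--     elif any(x in filename for x in ['zm25', 'zm_', 'zm', 'soymeal', 'soybean_meal']):
--         return 'ZM', 'soybean_meal_prices'
--     elif any(x in filename for x in ['zc25', 'zc_', 'zc', 'corn']):
--         return 'ZC', 'corn_prices'
--     elif any(x in filename for x in ['zw25', 'zw_', 'zw', 'wheat']):
--         return 'ZW', 'wheat_prices'
--     elif any(x in filename for x in ['ct25', 'ct_', 'cotton']):
--         return 'CT', 'cotton_prices'
--     elif any(x in filename for x in ['cl25', 'cl_', 'cl', 'crude', 'oil']):
--         return 'CL', 'crude_oil_prices'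
--
--     # RATES & TREASURY (Research-weighted)
--     elif any(x in filename for x in ['tnx', '10y', 'treasury', 'note']):
--         return 'TNX', 'treasury_prices'
--     elif any(x in filename for x in ['znz25', 'znz_', 'treasury_futures']):
--         return 'ZNZ', 'treasury_prices'
--     elif any(x in filename for x in ['fix25', 'fix_', 'fed', 'rates', 'ffr']):
--         return 'FFR', 'treasury_prices'
--
--     # PALM OIL / FCPO (route to generic market_prices for now)
--     elif any(x in filename for x in ['fcpo', 'palm', 'mpob', 'cpo', 'bmd']):
--         return 'FCPO', 'market_prices'
--     elif any(x in filename for x in ['mpcv', 'mpc', 'usd_malaysian_crude_palm', 'usd cpo']):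
--         return 'MPC', 'market_prices'
--
--     # ETHANOL/BIOFUELS
--     elif any(x in filename for x in ['bdov25', 'bdov_', 'biodiesel']):
--         return 'BDOV', 'biofuel_prices'
--     elif any(x in filename for x in ['eth25', 'eth_', 'ethanol']):
--         return 'ETH', 'biofuel_prices'
--     elif any(x in filename for x in ['rin25', 'rin_', 'renewable']):
--         return 'RIN', 'biofuel_prices'
--
--     # INDICES & VOLATILITY
--     elif any(x in filename for x in ['dxy', 'dollar', 'usd_index']):
--         return 'DXY', 'usd_index_prices'
--     elif any(x in filename for x in ['vix25', 'vix_', 'vix', 'volatility']):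
--         return 'VIX', 'vix_daily'
--
--     # OTHER COMMODITIES (Generic routing)
--     elif any(x in filename for x in ['qa225', 'qa2_']):
--         return 'QA2', 'market_prices'
--     elif any(x in filename for x in ['cs225', 'cs2_']):
--         return 'CS2', 'market_prices'
--     elif any(x in filename for x in ['rsx25', 'rsx_']):
--         return 'RSX', 'market_prices'
--     elif any(x in filename for x in ['zwz25', 'zwz_']):
--         return 'ZWZ', 'wheat_prices'
--
--     # Default to market_prices for unknown
--     return 'UNKNOWN', 'market_prices'
-- ===== SOURCE B (Python) =====
-- # Alternative algorithm: instead of an ordered first-match chain of substring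
-- # tests, scan the filename position by position and keep the minimum rule
-- # priority whose substring starts there; the answer is the best-priority rule.
--
-- _GROUPS = [
--     (['usdmyr', 'myr', 'ringgit'], 'USDMYR', 'currency_data'),
--     (['usdcny', 'cny', 'yuan'], 'USDCNY', 'currency_data'),
--     (['usdars', 'ars', 'peso'], 'USDARS', 'currency_data'),
--     (['usdbrl', 'brl', 'real'], 'USDBRL', 'currency_data'),
--     (['eurusd', 'eur'], 'EURUSD', 'currency_data'),
--     (['usdjpy', 'jpy', 'yen'], 'USDJPY', 'currency_data'),
--     (['zl25', 'zl_', 'zl', 'soybean_oil', 'soyoil'], 'ZL', 'soybean_oil_prices'),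
--     (['zs25', 'zs_', 'zs', 'soybean'], 'ZS', 'soybean_prices'),
--     (['zm25', 'zm_', 'zm', 'soymeal', 'soybean_meal'], 'ZM', 'soybean_meal_prices'),
--     (['zc25', 'zc_', 'zc', 'corn'], 'ZC', 'corn_prices'),
--     (['zw25', 'zw_', 'zw', 'wheat'], 'ZW', 'wheat_prices'),
--     (['ct25', 'ct_', 'cotton'], 'CT', 'cotton_prices'),
--     (['cl25', 'cl_', 'cl', 'crude', 'oil'], 'CL', 'crude_oil_prices'),
--     (['tnx', '10y', 'treasury', 'note'], 'TNX', 'treasury_prices'),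
--     (['znz25', 'znz_', 'treasury_futures'], 'ZNZ', 'treasury_prices'),
--     (['fix25', 'fix_', 'fed', 'rates', 'ffr'], 'FFR', 'treasury_prices'),
--     (['fcpo', 'palm', 'mpob', 'cpo', 'bmd'], 'FCPO', 'market_prices'),
--     (['mpcv', 'mpc', 'usd_malaysian_crude_palm', 'usd cpo'], 'MPC', 'market_prices'),
--     (['bdov25', 'bdov_', 'biodiesel'], 'BDOV', 'biofuel_prices'),
--     (['eth25', 'eth_', 'ethanol'], 'ETH', 'biofuel_prices'),
--     (['rin25', 'rin_', 'renewable'], 'RIN', 'biofuel_prices'),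
--     (['dxy', 'dollar', 'usd_index'], 'DXY', 'usd_index_prices'),
--     (['vix25', 'vix_', 'vix', 'volatility'], 'VIX', 'vix_daily'),
--     (['qa225', 'qa2_'], 'QA2', 'market_prices'),
--     (['cs225', 'cs2_'], 'CS2', 'market_prices'),
--     (['rsx25', 'rsx_'], 'RSX', 'market_prices'),
--     (['zwz25', 'zwz_'], 'ZWZ', 'wheat_prices'),
-- ]
--
-- # every substring paired with the priority (index) of its rule
-- _SUBS = [(sub, i) for i, (subs, _, _) in enumerate(_GROUPS) for sub in subs]
-- _OUT = [(sym, tbl) for _, sym, tbl in _GROUPS]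
--
--
-- def detect_symbol_type(filename: str) -> tuple:
--     """Detect symbol and target table from filename (positional min-priority scan)."""
--     f = filename.lower()
--     best = len(_OUT)  # sentinel: no rule matched yet
--     for pos in range(len(f)):
--         for sub, prio in _SUBS:
--             if prio < best and f.startswith(sub, pos):
--                 best = prio
--     return _OUT[best] if best < len(_OUT) else ('UNKNOWN', 'market_prices')
-- ===== Notes on version B (the rewrite author's own statement) =====
-- stated objective: alternative
-- what changed: Replaced the ordered if/elif chain of per-rule substring membership tests by a single positional scan of the filename that, at each position, updates the minimum priority of any rule whose substring starts there, then returns the best-priority rule.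
import Mathlib
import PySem

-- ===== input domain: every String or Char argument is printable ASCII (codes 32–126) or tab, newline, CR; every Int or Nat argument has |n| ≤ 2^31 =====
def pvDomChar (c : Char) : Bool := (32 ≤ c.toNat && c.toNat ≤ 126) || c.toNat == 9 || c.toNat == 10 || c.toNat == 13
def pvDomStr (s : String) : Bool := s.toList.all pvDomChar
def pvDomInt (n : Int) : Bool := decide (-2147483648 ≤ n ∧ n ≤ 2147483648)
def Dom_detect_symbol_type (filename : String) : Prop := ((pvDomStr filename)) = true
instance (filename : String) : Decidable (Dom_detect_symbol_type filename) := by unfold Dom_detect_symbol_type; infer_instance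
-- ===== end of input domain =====

-- ===== PORT A =====
-- B replaces A's ordered if/elif chain of substring tests by a positional scan of the
-- filename keeping the minimum-priority matching rule (objective: alternative algorithm).
def detect_symbol_type (filename : String) : String × String :=
  let f := PySem.Str.lower filename
  if (["usdmyr", "myr", "ringgit"]).any (fun x => PySem.Str.isIn x f) then ("USDMYR", "currency_data") else
  if (["usdcny", "cny", "yuan"]).any (fun x => PySem.Str.isIn x f) then ("USDCNY", "currency_data") else
  if (["usdars", "ars", "peso"]).any (fun x => PySem.Str.isIn x f) then ("USDARS", "currency_data") else
  if (["usdbrl", "brl", "real"]).any (fun x => PySem.Str.isIn x f) then ("USDBRL", "currency_data") else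
  if (["eurusd", "eur"]).any (fun x => PySem.Str.isIn x f) then ("EURUSD", "currency_data") else
  if (["usdjpy", "jpy", "yen"]).any (fun x => PySem.Str.isIn x f) then ("USDJPY", "currency_data") else
  if (["zl25", "zl_", "zl", "soybean_oil", "soyoil"]).any (fun x => PySem.Str.isIn x f) then ("ZL", "soybean_oil_prices") else
  if (["zs25", "zs_", "zs", "soybean"]).any (fun x => PySem.Str.isIn x f) then ("ZS", "soybean_prices") else
  if (["zm25", "zm_", "zm", "soymeal", "soybean_meal"]).any (fun x => PySem.Str.isIn x f) then ("ZM", "soybean_meal_prices") else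
  if (["zc25", "zc_", "zc", "corn"]).any (fun x => PySem.Str.isIn x f) then ("ZC", "corn_prices") else
  if (["zw25", "zw_", "zw", "wheat"]).any (fun x => PySem.Str.isIn x f) then ("ZW", "wheat_prices") else
  if (["ct25", "ct_", "cotton"]).any (fun x => PySem.Str.isIn x f) then ("CT", "cotton_prices") else
  if (["cl25", "cl_", "cl", "crude", "oil"]).any (fun x => PySem.Str.isIn x f) then ("CL", "crude_oil_prices") else
  if (["tnx", "10y", "treasury", "note"]).any (fun x => PySem.Str.isIn x f) then ("TNX", "treasury_prices") else
  if (["znz25", "znz_", "treasury_futures"]).any (fun x => PySem.Str.isIn x f) then ("ZNZ", "treasury_prices") else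
  if (["fix25", "fix_", "fed", "rates", "ffr"]).any (fun x => PySem.Str.isIn x f) then ("FFR", "treasury_prices") else
  if (["fcpo", "palm", "mpob", "cpo", "bmd"]).any (fun x => PySem.Str.isIn x f) then ("FCPO", "market_prices") else
  if (["mpcv", "mpc", "usd_malaysian_crude_palm", "usd cpo"]).any (fun x => PySem.Str.isIn x f) then ("MPC", "market_prices") else
  if (["bdov25", "bdov_", "biodiesel"]).any (fun x => PySem.Str.isIn x f) then ("BDOV", "biofuel_prices") else
  if (["eth25", "eth_", "ethanol"]).any (fun x => PySem.Str.isIn x f) then ("ETH", "biofuel_prices") else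
  if (["rin25", "rin_", "renewable"]).any (fun x => PySem.Str.isIn x f) then ("RIN", "biofuel_prices") else
  if (["dxy", "dollar", "usd_index"]).any (fun x => PySem.Str.isIn x f) then ("DXY", "usd_index_prices") else
  if (["vix25", "vix_", "vix", "volatility"]).any (fun x => PySem.Str.isIn x f) then ("VIX", "vix_daily") else
  if (["qa225", "qa2_"]).any (fun x => PySem.Str.isIn x f) then ("QA2", "market_prices") else
  if (["cs225", "cs2_"]).any (fun x => PySem.Str.isIn x f) then ("CS2", "market_prices") else
  if (["rsx25", "rsx_"]).any (fun x => PySem.Str.isIn x f) then ("RSX", "market_prices") else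
  if (["zwz25", "zwz_"]).any (fun x => PySem.Str.isIn x f) then ("ZWZ", "wheat_prices") else
  ("UNKNOWN", "market_prices")

-- ===== PORT B =====
def pvGroups : List (List String × String × String) := [
  (["usdmyr", "myr", "ringgit"], "USDMYR", "currency_data"),
  (["usdcny", "cny", "yuan"], "USDCNY", "currency_data"),
  (["usdars", "ars", "peso"], "USDARS", "currency_data"),
  (["usdbrl", "brl", "real"], "USDBRL", "currency_data"),
  (["eurusd", "eur"], "EURUSD", "currency_data"),
  (["usdjpy", "jpy", "yen"], "USDJPY", "currency_data"),
  (["zl25", "zl_", "zl", "soybean_oil", "soyoil"], "ZL", "soybean_oil_prices"),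
  (["zs25", "zs_", "zs", "soybean"], "ZS", "soybean_prices"),
  (["zm25", "zm_", "zm", "soymeal", "soybean_meal"], "ZM", "soybean_meal_prices"),
  (["zc25", "zc_", "zc", "corn"], "ZC", "corn_prices"),
  (["zw25", "zw_", "zw", "wheat"], "ZW", "wheat_prices"),
  (["ct25", "ct_", "cotton"], "CT", "cotton_prices"),
  (["cl25", "cl_", "cl", "crude", "oil"], "CL", "crude_oil_prices"),
  (["tnx", "10y", "treasury", "note"], "TNX", "treasury_prices"),
  (["znz25", "znz_", "treasury_futures"], "ZNZ", "treasury_prices"),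
  (["fix25", "fix_", "fed", "rates", "ffr"], "FFR", "treasury_prices"),
  (["fcpo", "palm", "mpob", "cpo", "bmd"], "FCPO", "market_prices"),
  (["mpcv", "mpc", "usd_malaysian_crude_palm", "usd cpo"], "MPC", "market_prices"),
  (["bdov25", "bdov_", "biodiesel"], "BDOV", "biofuel_prices"),
  (["eth25", "eth_", "ethanol"], "ETH", "biofuel_prices"),
  (["rin25", "rin_", "renewable"], "RIN", "biofuel_prices"),
  (["dxy", "dollar", "usd_index"], "DXY", "usd_index_prices"),
  (["vix25", "vix_", "vix", "volatility"], "VIX", "vix_daily"),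
  (["qa225", "qa2_"], "QA2", "market_prices"),
  (["cs225", "cs2_"], "CS2", "market_prices"),
  (["rsx25", "rsx_"], "RSX", "market_prices"),
  (["zwz25", "zwz_"], "ZWZ", "wheat_prices")]

-- every substring paired with the priority (index) of its rule
def pvSubs : List (List Char × Nat) :=
  pvGroups.zipIdx.flatMap (fun gi => gi.1.1.map (fun s => (s.toList, gi.2)))

def pvOut : List (String × String) := pvGroups.map (fun g => (g.2.1, g.2.2))

def detect_symbol_type_alt (filename : String) : String × String :=
  let f := (PySem.Str.lower filename).toList
  let best := (List.range f.length).foldl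
      (fun b pos =>
        pvSubs.foldl
          (fun b' sp => if sp.2 < b' && sp.1.isPrefixOf (f.drop pos) then sp.2 else b') b)
      pvOut.length
  if best < pvOut.length then pvOut.getD best ("UNKNOWN", "market_prices")
  else ("UNKNOWN", "market_prices")

-- ===== PRECONDITION & SPEC =====
def Spec_detect_symbol_type (filename : String) (out : String × String) : Prop := out = detect_symbol_type_alt filename
instance (filename : String) (out : String × String) : Decidable (Spec_detect_symbol_type filename out) := by unfold Spec_detect_symbol_type; infer_instance

-- ===== CLAIM (what is proved, stated in full; the proofs are below) =====
def Claim_equal_detect_symbol_type : Prop := ∀ (filename : String), Dom_detect_symbol_type filename → Spec_detect_symbol_type filename (detect_symbol_type filename)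

-- ===== LEMMAS AND PROOFS =====

-- the predicate of A's chain: some substring of the group occurs in f
def pvP (f : String) (g : List String × String × String) : Bool :=
  g.1.any (fun x => PySem.Str.isIn x f)

-- A's chain as structural recursion over a group list
def pvChain (f : String) : List (List String × String × String) → String × String
  | [] => ("UNKNOWN", "market_prices")
  | g :: rest => if pvP f g then (g.2.1, g.2.2) else pvChain f rest

lemma pvChain_eq_findIdx (f : String) (gs : List (List String × String × String)) :
    pvChain f gs =
      (if gs.findIdx (pvP f) < gs.length
       then ((gs.getD (gs.findIdx (pvP f)) ([], "", "")).2.1,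
             (gs.getD (gs.findIdx (pvP f)) ([], "", "")).2.2)
       else ("UNKNOWN", "market_prices")) := by
  induction gs with
  | nil => simp [pvChain]
  | cons g rest ih =>
      by_cases h : pvP f g
      · simp [pvChain, h, List.findIdx_cons]
      · simp only [pvChain, h, Bool.false_eq_true, List.findIdx_cons, cond_false, ih,
          List.length_cons, List.getD_cons_succ]
        split_ifs with h1 h2 <;> first | rfl | (exfalso; omega)

-- A is exactly the chain over the rules table (same tests, same order)
lemma detect_eq_pvChain (filename : String) :
    detect_symbol_type filename = pvChain (PySem.Str.lower filename) pvGroups := by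
  simp only [detect_symbol_type, pvGroups, pvChain, pvP]

-- findIdx is ≤ any index satisfying the predicate
lemma findIdx_le_of_getElem {α : Type} (l : List α) (p : α → Bool) (i : Nat)
    (h : i < l.length) (hp : p l[i] = true) : l.findIdx p ≤ i := by
  by_contra hlt
  have hfalse := List.not_of_lt_findIdx (xs := l) (p := p) (i := i) (by omega)
  exact absurd (hp.symm.trans hfalse) (by simp)

-- inner fold: result is the min of b and the priorities matching at this position
lemma inner_spec (subs : List (List Char × Nat)) (tail : List Char) :
    ∀ b : Nat,
      (let r := subs.foldl (fun b' sp => if sp.2 < b' && sp.1.isPrefixOf tail then sp.2 else b') b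
       (r = b ∨ ∃ sp ∈ subs, sp.1.isPrefixOf tail = true ∧ r = sp.2) ∧ r ≤ b ∧
         ∀ sp ∈ subs, sp.1.isPrefixOf tail = true → r ≤ sp.2) := by
  induction subs with
  | nil => intro b; exact ⟨Or.inl rfl, le_refl b, by simp⟩
  | cons sp rest ih =>
      intro b
      simp only [List.foldl_cons]
      set b₁ := (if sp.2 < b && sp.1.isPrefixOf tail then sp.2 else b) with hb₁
      obtain ⟨hmem, hle, hmin⟩ := ih b₁
      have hcase : (sp.1.isPrefixOf tail = true ∧ b₁ = sp.2) ∨ b₁ = b := by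
        rw [hb₁]
        split_ifs with h
        · simp only [Bool.and_eq_true, decide_eq_true_eq] at h
          exact Or.inl ⟨h.2, rfl⟩
        · exact Or.inr rfl
      have hb₁le : b₁ ≤ b := by
        rw [hb₁]
        split_ifs with h
        · simp only [Bool.and_eq_true, decide_eq_true_eq] at h
          omega
        · exact le_refl b
      refine ⟨?_, le_trans hle hb₁le, ?_⟩
      · rcases hmem with h | ⟨sp', hsp', hpre, hr⟩
        · rcases hcase with ⟨hpre, hbv⟩ | hbv
          · exact Or.inr ⟨sp, List.mem_cons_self, hpre, h.trans hbv⟩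
          · exact Or.inl (h.trans hbv)
        · exact Or.inr ⟨sp', List.mem_cons_of_mem _ hsp', hpre, hr⟩
      · intro sp' hsp' hpre
        rcases List.mem_cons.mp hsp' with heq | hmem'
        · subst heq
          have hb2 : b₁ ≤ sp'.2 := by
            rw [hb₁]
            split_ifs with h
            · exact le_refl _
            · simp only [hpre, Bool.and_true, decide_eq_true_eq] at h
              omega
          exact le_trans hle hb2
        · exact hmin sp' hmem' hpre

-- outer fold: result is the min of b and all priorities matching at any scanned position
lemma outer_spec (subs : List (List Char × Nat)) (f : List Char) :
    ∀ (poss : List Nat) (b : Nat),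
      (let r := poss.foldl
          (fun b pos => subs.foldl
            (fun b' sp => if sp.2 < b' && sp.1.isPrefixOf (f.drop pos) then sp.2 else b') b) b
       (r = b ∨ ∃ sp ∈ subs, (∃ pos ∈ poss, sp.1.isPrefixOf (f.drop pos) = true) ∧ r = sp.2) ∧
         r ≤ b ∧
         ∀ sp ∈ subs, ∀ pos ∈ poss, sp.1.isPrefixOf (f.drop pos) = true → r ≤ sp.2) := by
  intro poss
  induction poss with
  | nil => intro b; exact ⟨Or.inl rfl, le_refl b, by simp⟩
  | cons pos rest ih =>
      intro b
      simp only [List.foldl_cons]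
      obtain ⟨hmem₁, hle₁, hmin₁⟩ := inner_spec subs (f.drop pos) b
      set b₁ := subs.foldl (fun b' sp => if sp.2 < b' && sp.1.isPrefixOf (f.drop pos) then sp.2 else b') b with hb₁
      obtain ⟨hmem, hle, hmin⟩ := ih b₁
      refine ⟨?_, le_trans hle hle₁, ?_⟩
      · rcases hmem with h | ⟨sp', hsp', ⟨pos', hpos', hpre⟩, hr⟩
        · rw [h]
          rcases hmem₁ with h₁ | ⟨sp', hsp', hpre, hr⟩
          · exact Or.inl h₁
          · exact Or.inr ⟨sp', hsp', ⟨pos, List.mem_cons_self, hpre⟩, hr⟩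
        · exact Or.inr ⟨sp', hsp', ⟨pos', List.mem_cons_of_mem _ hpos', hpre⟩, hr⟩
      · intro sp' hsp' pos' hpos' hpre
        rcases List.mem_cons.mp hpos' with heq | hmem'
        · subst heq
          exact le_trans hle (hmin₁ sp' hsp' hpre)
        · exact hmin sp' hsp' pos' hmem' hpre

-- literal facts about the rules table, checked by the kernel
lemma pvSubs_bounds : ∀ sp ∈ pvSubs, sp.1 ≠ [] ∧ sp.2 < pvGroups.length := by decide

lemma pvSubs_to_group : ∀ sp ∈ pvSubs,
    ∃ s ∈ (pvGroups.getD sp.2 ([], "", "")).1, s.toList = sp.1 := by decide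

lemma group_to_pvSubs : ∀ i ∈ List.range pvGroups.length,
    ∀ s ∈ (pvGroups.getD i ([], "", "")).1, (s.toList, i) ∈ pvSubs := by decide

lemma pvOut_getD : ∀ k ∈ List.range pvGroups.length,
    pvOut.getD k ("UNKNOWN", "market_prices") =
      ((pvGroups.getD k ([], "", "")).2.1, (pvGroups.getD k ([], "", "")).2.2) := by decide

lemma pvOut_length : pvOut.length = pvGroups.length := by decide

-- occurrence at a scanned position ↔ Python's 'sub in f', for nonempty sub
lemma occ_iff_isIn (s : List Char) (hs : s ≠ []) (fl : List Char) :
    (∃ pos ∈ List.range fl.length, s.isPrefixOf (fl.drop pos) = true) ↔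
      PySem.Chars.isIn s fl = true := by
  rw [PySem.Chars.isIn_iff_infix]
  constructor
  · rintro ⟨pos, _, hpre⟩
    rw [List.isPrefixOf_iff_prefix] at hpre
    exact List.IsInfix.trans hpre.isInfix (List.drop_suffix pos fl).isInfix
  · intro hinf
    obtain ⟨j, hj⟩ := (PySem.Chars.exists_prefix_drop_iff_isIn (sub := s) (s := fl)).mpr
      (by rw [PySem.Chars.isIn_iff_infix]; exact hinf)
    have hjlt : j < fl.length := by
      by_contra hge
      rw [List.drop_eq_nil_of_le (by omega)] at hj
      exact hs (List.prefix_nil.mp hj)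
    exact ⟨j, List.mem_range.mpr hjlt, List.isPrefixOf_iff_prefix.mpr hj⟩

-- a group at index i matches (A's test) ↔ some pvSubs entry with priority i occurs
lemma group_match_iff (f : String) (i : Nat) (hi : i < pvGroups.length) :
    (pvP f (pvGroups.getD i ([], "", "")) = true ↔
      ∃ sp ∈ pvSubs, sp.2 = i ∧
        ∃ pos ∈ List.range f.toList.length, sp.1.isPrefixOf (f.toList.drop pos) = true) := by
  constructor
  · intro h
    simp only [pvP, List.any_eq_true, PySem.Str.isIn_eq] at h
    obtain ⟨s, hs, hin⟩ := h
    have hmem : (s.toList, i) ∈ pvSubs := group_to_pvSubs i (List.mem_range.mpr hi) s hs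
    have hne : s.toList ≠ [] := (pvSubs_bounds _ hmem).1
    have hocc := (occ_iff_isIn s.toList hne f.toList).mpr hin
    exact ⟨(s.toList, i), hmem, rfl, hocc⟩
  · rintro ⟨sp, hsp, rfl, hocc⟩
    obtain ⟨s, hs, hlist⟩ := pvSubs_to_group sp hsp
    have hne : sp.1 ≠ [] := (pvSubs_bounds sp hsp).1
    have hin := (occ_iff_isIn sp.1 hne f.toList).mp hocc
    simp only [pvP, List.any_eq_true, PySem.Str.isIn_eq]
    refine ⟨s, hs, ?_⟩
    rw [hlist]
    exact hin

-- ===== VERDICT (by name: the statement is the Claim_ definition above) =====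
theorem detect_symbol_type_spec : Claim_equal_detect_symbol_type := by
  intro filename _
  unfold Spec_detect_symbol_type
  rw [detect_eq_pvChain, pvChain_eq_findIdx]
  set f := PySem.Str.lower filename with hf
  set k := pvGroups.findIdx (pvP f) with hk
  obtain ⟨hmem, hle, hmin⟩ := outer_spec pvSubs f.toList (List.range f.toList.length) pvOut.length
  set r := (List.range f.toList.length).foldl
      (fun b pos => pvSubs.foldl
        (fun b' sp => if sp.2 < b' && sp.1.isPrefixOf (f.toList.drop pos) then sp.2 else b') b)
      pvOut.length with hr
  have halt : detect_symbol_type_alt filename =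
      (if r < pvOut.length then pvOut.getD r ("UNKNOWN", "market_prices")
       else ("UNKNOWN", "market_prices")) := rfl
  rw [halt]
  have hol : pvOut.length = pvGroups.length := pvOut_length
  by_cases hklt : k < pvGroups.length
  · -- some group matches; the first one is k and it has a matching substring
    have hpk : pvP f (pvGroups.getD k ([], "", "")) = true := by
      rw [List.getD_eq_getElem _ _ hklt]
      exact List.findIdx_getElem
    obtain ⟨sp, hsp, hsp2, hocc⟩ := (group_match_iff f k hklt).mp hpk
    have hrk : r ≤ k := by
      obtain ⟨pos, hpos, hpre⟩ := hocc
      have := hmin sp hsp pos hpos hpre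
      omega
    have hkr : k ≤ r := by
      rcases hmem with h | ⟨sp', hsp', ⟨pos', hpos', hpre⟩, hr'⟩
      · omega
      · have hlt : sp'.2 < pvGroups.length := (pvSubs_bounds sp' hsp').2
        have hmatch : pvP f (pvGroups.getD sp'.2 ([], "", "")) = true :=
          (group_match_iff f sp'.2 hlt).mpr ⟨sp', hsp', rfl, pos', hpos', hpre⟩
        have hfle := findIdx_le_of_getElem pvGroups (pvP f) sp'.2 hlt
          (by rw [← List.getD_eq_getElem _ ([], "", "") hlt]; exact hmatch)
        omega
    have hrEq : r = k := le_antisymm hrk hkr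
    rw [hrEq, if_pos hklt, if_pos (by omega : k < pvOut.length)]
    exact (pvOut_getD k (List.mem_range.mpr hklt)).symm
  · -- no group matches: r stays at the sentinel
    have hrEq : r = pvOut.length := by
      rcases hmem with h | ⟨sp', hsp', ⟨pos', hpos', hpre⟩, hr'⟩
      · exact h
      · exfalso
        have hlt : sp'.2 < pvGroups.length := (pvSubs_bounds sp' hsp').2
        have hmatch : pvP f (pvGroups.getD sp'.2 ([], "", "")) = true :=
          (group_match_iff f sp'.2 hlt).mpr ⟨sp', hsp', rfl, pos', hpos', hpre⟩
        have hfle := findIdx_le_of_getElem pvGroups (pvP f) sp'.2 hlt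
          (by rw [← List.getD_eq_getElem _ ([], "", "") hlt]; exact hmatch)
        omega
    rw [hrEq, if_neg hklt, if_neg (by omega : ¬ pvOut.length < pvOut.length)]
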